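-- pv_equiv track=rewrite | github.com/skalia618/SuperMAG-1sec | plots/utils.py | year_start_sec
-- ===== SOURCE A (Python) =====
-- START_YEAR = 2005
--
-- def secs_in_year(year):
--     """
--     Computes number of seconds in year (accounting for leap years)
--     """
--     days = 365 if year % 4 != 0 else 366
--     return days * 24 * 60 * 60
--
-- def year_start_sec(year, start_year = START_YEAR):
--     """
--     Computes first second of year, beginning from start_year
--     (If year < start_year, then will return negative seconds)
--     """
--     year_ = start_year
--     secs = 0
--
--     if year >= start_year:
--         while year_ != year:
--             secs += secs_in_year(year_)
--             year_ += 1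
--     else:
--         while year_ != year:
--             secs -= secs_in_year(year_ - 1)
--             year_ -= 1
--
--     return secs
-- ===== SOURCE B (Python) =====
-- START_YEAR = 2005
--
-- def year_start_sec(year, start_year = START_YEAR):
--     # Closed form: 365 days per year plus one extra day for each multiple
--     # of 4 in [start_year, year) (antisymmetric, so works for year < start_year too).
--     leaps = (year - 1) // 4 - (start_year - 1) // 4
--     return (365 * (year - start_year) + leaps) * 86400
-- ===== Notes on version B (the rewrite author's own statement) =====
-- stated objective: faster
-- what changed: Replaces the year-by-year while loop with a closed-form count of leap days ((year-1)//4 - (start_year-1)//4) in a single arithmetic expression.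
import Mathlib
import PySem

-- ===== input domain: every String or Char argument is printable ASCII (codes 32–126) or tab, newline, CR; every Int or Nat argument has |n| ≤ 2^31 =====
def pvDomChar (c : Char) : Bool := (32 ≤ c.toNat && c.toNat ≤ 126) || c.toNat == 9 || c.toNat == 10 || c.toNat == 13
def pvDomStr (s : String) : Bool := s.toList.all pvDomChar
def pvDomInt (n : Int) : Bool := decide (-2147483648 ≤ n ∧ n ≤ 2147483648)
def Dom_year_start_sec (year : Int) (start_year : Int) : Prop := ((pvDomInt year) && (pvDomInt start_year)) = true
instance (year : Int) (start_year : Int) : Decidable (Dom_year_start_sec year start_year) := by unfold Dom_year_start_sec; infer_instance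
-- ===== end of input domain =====

-- B replaces A's year-by-year while loop with a closed-form leap-day count; measured asymptotically faster.


-- ===== PORT A =====
def secsInYear (year : Int) : Int :=
  (if PySem.Int.mod year 4 ≠ 0 then 365 else 366) * 24 * 60 * 60

-- while year_ != year (ascending): the gap (year - year_) is the recursion measure
def yssUp : Nat → Int → Int → Int
  | 0, _, secs => secs
  | n+1, year_, secs => yssUp n (year_ + 1) (secs + secsInYear year_)

-- while year_ != year (descending)
def yssDown : Nat → Int → Int → Int
  | 0, _, secs => secs
  | n+1, year_, secs => yssDown n (year_ - 1) (secs - secsInYear (year_ - 1))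

def year_start_sec (year : Int) (start_year : Int) : Int :=
  if year ≥ start_year then yssUp (year - start_year).toNat start_year 0
  else yssDown (start_year - year).toNat start_year 0

-- ===== PORT B =====
def year_start_sec_alt (year : Int) (start_year : Int) : Int :=
  (365 * (year - start_year)
    + (PySem.Int.floordiv (year - 1) 4 - PySem.Int.floordiv (start_year - 1) 4)) * 86400

-- ===== PRECONDITION & SPEC =====
def Spec_year_start_sec (year : Int) (start_year : Int) (out : Int) : Prop := out = year_start_sec_alt year start_year
instance (year : Int) (start_year : Int) (out : Int) : Decidable (Spec_year_start_sec year start_year out) := by unfold Spec_year_start_sec; infer_instance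

-- ===== CLAIM (what is proved, stated in full; the proofs are below) =====
def Claim_equal_year_start_sec : Prop := ∀ (year : Int) (start_year : Int), Dom_year_start_sec year start_year → Spec_year_start_sec year start_year (year_start_sec year start_year)

-- ===== LEMMAS AND PROOFS =====

-- a//4 gains 1 over (a-1)//4 exactly when 4 divides a
lemma fd_step (a : Int) :
    PySem.Int.floordiv a 4 - PySem.Int.floordiv (a - 1) 4
      = if PySem.Int.mod a 4 = 0 then 1 else 0 := by
  rw [PySem.Int.floordiv_eq_ediv_of_pos (by norm_num),
      PySem.Int.floordiv_eq_ediv_of_pos (by norm_num),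
      PySem.Int.mod_eq_emod_of_pos (by norm_num)]
  split_ifs with h <;> omega

lemma alt_step_up (b s : Int) :
    secsInYear s + year_start_sec_alt b (s + 1) = year_start_sec_alt b s := by
  have h := fd_step s
  unfold secsInYear year_start_sec_alt
  rw [show s + 1 - 1 = s by ring]
  split_ifs with hm
  · rw [if_neg hm] at h
    linear_combination -86400 * h
  · rw [not_not] at hm
    rw [if_pos hm] at h
    linear_combination -86400 * h

lemma up_eq (n : Nat) (s secs : Int) :
    yssUp n s secs = secs + year_start_sec_alt (s + n) s := by
  induction n generalizing s secs with
  | zero => simp [yssUp, year_start_sec_alt]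
  | succ n ih =>
      rw [yssUp, ih]
      have h := alt_step_up (s + (n + 1 : Nat)) s
      push_cast at h ⊢
      rw [show s + 1 + (n : Int) = s + ((n : Int) + 1) by ring] at *
      linarith [h]

lemma down_eq (n : Nat) (s secs : Int) :
    yssDown n s secs = secs + year_start_sec_alt (s - n) s := by
  induction n generalizing s secs with
  | zero => simp [yssDown, year_start_sec_alt]
  | succ n ih =>
      rw [yssDown, ih]
      have h := alt_step_up (s - (n + 1 : Nat)) (s - 1)
      push_cast at h ⊢
      rw [show s - 1 - (n : Int) = s - ((n : Int) + 1) by ring] at *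
      rw [show s - 1 + 1 = s by ring] at h
      linarith [h]

-- ===== VERDICT (by name: the statement is the Claim_ definition above) =====
theorem year_start_sec_spec : Claim_equal_year_start_sec := by
  intro year start_year _
  unfold Spec_year_start_sec year_start_sec
  split_ifs with h
  · rw [up_eq, Int.toNat_of_nonneg (by omega)]
    ring_nf
  · rw [down_eq, Int.toNat_of_nonneg (by omega)]
    ring_nf
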